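-- pv_equiv track=rewrite | github.com/mahditaharb-maker/myfiles | 2 (6).py | field_characteristic
-- ===== SOURCE A (Python) =====
-- import math
-- from typing import Optional
--
-- def is_prime(n: int) -> bool:
--     """
--     Check if n is prime using trial division.
--     """
--     if n < 2:
--         return False
--     if n in (2, 3):
--         return True
--     if n % 2 == 0 or n % 3 == 0:
--         return False
--     i = 5
--     while i * i <= n:
--         if n % i == 0 or n % (i + 2) == 0:
--             return False
--         i += 6
--     return True
--
-- def field_characteristic(order: int) -> Optional[int]:
--     """
--     Return the characteristic p of the finite field of size `order` (i.e. order = p**k),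
--     or None if no such field exists.
--     """
--     if order < 2:
--         return None
--
--     # Try prime divisors up to √order
--     limit = int(math.isqrt(order))
--     for p in range(2, limit + 1):
--         if order % p != 0:
--             continue
--         if not is_prime(p):
--             continue
--
--         # count exponent k so that p**k divides order
--         k = 0
--         m = order
--         while m % p == 0:
--             m //= p
--             k += 1
--
--         # if p**k == order then order is a pure prime power
--         if p ** k == order:
--             return p
--         else:
--             return None
--
--     # if no small divisor found, maybe order itself is prime
--     if is_prime(order):
--         return order
--
--     return None
-- ===== SOURCE B (Python) =====
-- def field_characteristic(order):
--     """
--     Return the characteristic p of the finite field of size `order` (order = p**k),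
--     or None if no such field exists.
--
--     Fully factorize `order` by trial division into its set of distinct prime
--     factors; a field of that size exists iff there is exactly one.
--     """
--     if order < 2:
--         return None
--     n = order
--     primes = set()
--     d = 2
--     while d * d <= n:
--         if n % d == 0:
--             primes.add(d)
--             while n % d == 0:
--                 n //= d
--         d += 1
--     if n > 1:
--         primes.add(n)
--     return primes.pop() if len(primes) == 1 else None
-- ===== Notes on version B (the rewrite author's own statement) =====
-- stated objective: simpler
-- what changed: B fully factorizes order by trial division into its set of distinct prime factors (dividing each found divisor out completely, adding the leftover if > 1) and returns the single element if the set is a singleton, replacing A's first-prime-divisor early return and dropping A's separate is_prime wheel helper entirely.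
import Mathlib
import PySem

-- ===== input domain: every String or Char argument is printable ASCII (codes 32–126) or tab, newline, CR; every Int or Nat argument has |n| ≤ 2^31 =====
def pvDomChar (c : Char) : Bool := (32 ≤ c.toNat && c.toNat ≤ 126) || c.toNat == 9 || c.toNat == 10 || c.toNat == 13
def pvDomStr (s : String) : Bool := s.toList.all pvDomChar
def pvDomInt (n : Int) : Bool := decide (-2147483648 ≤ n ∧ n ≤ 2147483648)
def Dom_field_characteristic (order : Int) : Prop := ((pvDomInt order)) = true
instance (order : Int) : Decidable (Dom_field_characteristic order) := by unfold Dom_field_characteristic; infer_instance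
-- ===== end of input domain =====

-- B replaces A's first-prime-divisor early return (plus its separate is_prime wheel helper) by a full
-- trial-division factorization into the set of distinct prime factors with a singleton check (objective: simpler).


-- ===== PORT A =====
-- the 'while i * i <= n' wheel loop of is_prime (i advances by 6); `fuel` only bounds the
-- number of iterations (callers pass enough for the loop to reach its Python exit condition)
def isPrimeLoop (fuel : Nat) (n i : Int) : Bool :=
  match fuel with
  | 0 => true
  | fuel + 1 =>
    if i * i ≤ n then
      if PySem.Int.mod n i == 0 || PySem.Int.mod n (i + 2) == 0 then false
      else isPrimeLoop fuel n (i + 6)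
    else true

def is_prime (n : Int) : Bool :=
  if n < 2 then false
  else if n == 2 || n == 3 then true
  else if PySem.Int.mod n 2 == 0 || PySem.Int.mod n 3 == 0 then false
  else isPrimeLoop (n + 2).toNat n 5

-- the inner 'while m % p == 0: m //= p; k += 1' of field_characteristic; returns the final (m, k)
def countExp (fuel : Nat) (p m k : Int) : Int × Int :=
  match fuel with
  | 0 => (m, k)
  | fuel + 1 =>
    if PySem.Int.mod m p == 0 then countExp fuel p (PySem.Int.floordiv m p) (k + 1)
    else (m, k)

-- the 'for p in range(2, limit + 1)' loop of field_characteristic, with the code after the loop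
def fcLoop (fuel : Nat) (order limit p : Int) : Option Int :=
  match fuel with
  | 0 => none
  | fuel + 1 =>
    if p ≤ limit then
      if PySem.Int.mod order p != 0 then fcLoop fuel order limit (p + 1)
      else if !is_prime p then fcLoop fuel order limit (p + 1)
      else
        let mk := countExp (order + 1).toNat p order 0
        -- 'p ** k == order'; k ≥ 0 here (counted up from 0), so Int exponentiation is p ^ k.toNat
        if p ^ mk.2.toNat == order then some p else none
    else
      if is_prime order then some order else none

def field_characteristic (order : Int) : Option Int :=
  if order < 2 then none
  else
    -- limit = int(math.isqrt(order)); Nat.sqrt is exact for math.isqrt on order ≥ 0 (here order ≥ 2)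
    let limit : Int := (Nat.sqrt order.toNat : Int)
    fcLoop (limit + 1).toNat order limit 2

-- ===== PORT B =====
-- the inner 'while n % d == 0: n //= d' of B; `fuel` only bounds the iterations
def stripAll (fuel : Nat) (n d : Int) : Int :=
  match fuel with
  | 0 => n
  | fuel + 1 =>
    if PySem.Int.mod n d == 0 then stripAll fuel (PySem.Int.floordiv n d) d
    else n

-- the outer 'while d * d <= n' loop of B, carrying (current d, remaining n, set of primes found)
def fcAltLoop (fuel : Nat) (d n : Int) (primes : PySem.Set Int) : Int × PySem.Set Int :=
  match fuel with
  | 0 => (n, primes)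
  | fuel + 1 =>
    if d * d ≤ n then
      if PySem.Int.mod n d == 0 then
        fcAltLoop fuel (d + 1) (stripAll n.toNat n d) (PySem.Set.add primes d)
      else fcAltLoop fuel (d + 1) n primes
    else (n, primes)

def field_characteristic_alt (order : Int) : Option Int :=
  if order < 2 then none
  else
    let r := fcAltLoop (order + 1).toNat 2 order PySem.Set.empty
    let primes := if r.1 > 1 then PySem.Set.add r.2 r.1 else r.2
    -- 'primes.pop() if len(primes) == 1 else None': pop on a one-element set is its unique element
    if PySem.Set.len primes == 1 then primes.head? else none

-- ===== PRECONDITION & SPEC =====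
def Spec_field_characteristic (order : Int) (out : Option Int) : Prop := out = field_characteristic_alt order
instance (order : Int) (out : Option Int) : Decidable (Spec_field_characteristic order out) := by unfold Spec_field_characteristic; infer_instance

-- ===== CLAIM (what is proved, stated in full; the proofs are below) =====
def Claim_equal_field_characteristic : Prop := ∀ (order : Int), Dom_field_characteristic order → Spec_field_characteristic order (field_characteristic order)


-- ===== LEMMAS AND PROOFS =====

-- "Int-prime": 2 ≤ q with no proper divisor; bridges both ports' divisor searches
def IPr (q : Int) : Prop := 2 ≤ q ∧ ∀ e : Int, 2 ≤ e → e < q → ¬ e ∣ q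

-- smallest prime factor of `order`, as an Int
def mF (order : Int) : Int := (order.toNat.minFac : Int)

-- "order is a power of its least prime factor" — the condition under which both programs answer `some`
def Cond (order : Int) : Prop := ∀ q : Int, IPr q → q ∣ order → q = mF order

theorem exists_small_divisor {n d : Int} (hn : 2 ≤ n) (hd : 2 ≤ d) (hlt : d < n)
    (hdvd : d ∣ n) : ∃ e : Int, 2 ≤ e ∧ e * e ≤ n ∧ e ∣ n := by
  by_cases hcase : d * d ≤ n
  · exact ⟨d, hd, hcase, hdvd⟩
  · obtain ⟨c, hc⟩ := hdvd
    have hc2 : 2 ≤ c := by nlinarith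
    refine ⟨c, hc2, ?_, ⟨d, by rw [hc]; ring⟩⟩
    nlinarith

theorem no_small_div_iff {n : Int} (hn : 2 ≤ n) :
    (∀ e : Int, 2 ≤ e → e * e ≤ n → ¬ e ∣ n) ↔ (∀ e : Int, 2 ≤ e → e < n → ¬ e ∣ n) := by
  constructor
  · intro h e he hlt hdvd
    obtain ⟨e', h1, h2, h3⟩ := exists_small_divisor hn he hlt hdvd
    exact h e' h1 h2 h3
  · intro h e he hsq hdvd
    have : e < n := by nlinarith
    exact h e he this hdvd

theorem iPr_iff_natPrime {q : Int} (hq : 2 ≤ q) : IPr q ↔ Nat.Prime q.toNat := by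
  have hcast : ((q.toNat : Int)) = q := Int.toNat_of_nonneg (by omega)
  constructor
  · intro ⟨_, hnd⟩
    rw [Nat.prime_def_lt']
    refine ⟨by omega, fun m hm hlt hdvd => ?_⟩
    refine hnd (m : Int) (by exact_mod_cast hm) (by omega) ?_
    rw [← hcast]
    exact_mod_cast hdvd
  · intro hp
    refine ⟨hq, fun e he hlt hdvd => ?_⟩
    have h1 : e.toNat ∣ q.toNat := by
      rw [← Int.natCast_dvd_natCast, hcast, Int.toNat_of_nonneg (by omega : (0:Int) ≤ e)]
      exact hdvd
    exact (Nat.prime_def_lt'.mp hp).2 e.toNat (by omega) (by omega) h1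

theorem iPr_prime {q : Int} (h : IPr q) : Prime q := by
  have hq : 2 ≤ q := h.1
  have := (iPr_iff_natPrime hq).mp h
  have h2 : Prime ((q.toNat : Int)) := Nat.prime_iff_prime_int.mp this
  rwa [Int.toNat_of_nonneg (by omega)] at h2

theorem mF_dvd {order : Int} (h : 2 ≤ order) : mF order ∣ order := by
  have : (order.toNat.minFac : Int) ∣ (order.toNat : Int) :=
    Int.natCast_dvd_natCast.mpr (Nat.minFac_dvd _)
  rwa [Int.toNat_of_nonneg (by omega)] at this

theorem mF_iPr {order : Int} (h : 2 ≤ order) : IPr (mF order) := by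
  have hne : order.toNat ≠ 1 := by omega
  have hp := Nat.minFac_prime hne
  have h2 : 2 ≤ mF order := by unfold mF; exact_mod_cast hp.two_le
  rw [iPr_iff_natPrime h2]
  unfold mF
  simpa using hp

theorem mF_min {order q : Int} (h : 2 ≤ order) (hq : 2 ≤ q) (hdvd : q ∣ order) :
    mF order ≤ q := by
  have h1 : q.toNat ∣ order.toNat := by
    rw [← Int.natCast_dvd_natCast, Int.toNat_of_nonneg (by omega : (0:Int) ≤ q),
      Int.toNat_of_nonneg (by omega : (0:Int) ≤ order)]
    exact hdvd
  have := Nat.minFac_le_of_dvd (by omega) h1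
  unfold mF
  omega

theorem isPrimeLoop_spec (fuel : Nat) (n i : Int)
    (hf : (n - i + 6).toNat < fuel)
    (hn : 5 ≤ n) (h2 : ¬ (2:Int) ∣ n) (h3 : ¬ (3:Int) ∣ n)
    (hi : 5 ≤ i) (hmod : i % 6 = 5)
    (hinv : ∀ d : Int, 2 ≤ d → d < i → ¬ d ∣ n) :
    isPrimeLoop fuel n i = true ↔ ∀ d : Int, 2 ≤ d → d * d ≤ n → ¬ d ∣ n := by
  induction fuel generalizing i with
  | zero => exact absurd hf (by omega)
  | succ fuel ih =>
    simp only [isPrimeLoop]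
    split_ifs with hguard hcheck
    · simp only [Bool.or_eq_true, beq_iff_eq, PySem.Int.mod_eq_zero_iff_dvd] at hcheck
      constructor
      · intro h; simp at h
      · intro hR; exfalso
        rcases hcheck with hdvd | hdvd
        · have hlt : i < n := by nlinarith
          obtain ⟨e, h1, h2a, h3a⟩ := exists_small_divisor (by omega) (by omega) hlt hdvd
          exact hR e h1 h2a h3a
        · have hlt : i + 2 < n := by nlinarith
          obtain ⟨e, h1, h2a, h3a⟩ := exists_small_divisor (by omega) (by omega) hlt hdvd
          exact hR e h1 h2a h3a
    · simp only [Bool.or_eq_true, beq_iff_eq, PySem.Int.mod_eq_zero_iff_dvd, not_or] at hcheck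
      have hii : i ≤ i * i := by nlinarith [mul_self_nonneg i, mul_self_nonneg (i - 1)]
      refine ih (i + 6) (by omega) (by omega) (by omega) ?_
      intro d hd hlt hdvd
      by_cases hdi : d < i
      · exact hinv d hd hdi hdvd
      · have hcases : d = i ∨ d = i + 1 ∨ d = i + 2 ∨ d = i + 3 ∨ d = i + 4 ∨ d = i + 5 := by
          omega
        rcases hcases with rfl | rfl | rfl | rfl | rfl | rfl
        · exact hcheck.1 hdvd
        · exact h2 (dvd_trans (by omega : (2:Int) ∣ i + 1) hdvd)
        · exact hcheck.2 hdvd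
        · exact h2 (dvd_trans (by omega : (2:Int) ∣ i + 3) hdvd)
        · exact h3 (dvd_trans (by omega : (3:Int) ∣ i + 4) hdvd)
        · exact h2 (dvd_trans (by omega : (2:Int) ∣ i + 5) hdvd)
    · constructor
      · intro _ d hd hdd hdvd
        refine hinv d hd ?_ hdvd
        by_contra hnd
        have hle : i ≤ d := by omega
        have : i * i ≤ d * d := mul_le_mul hle hle (by omega) (by omega)
        omega
      · intro _; rfl

theorem is_prime_iff (n : Int) :
    is_prime n = true ↔ (2 ≤ n ∧ ∀ e : Int, 2 ≤ e → e * e ≤ n → ¬ e ∣ n) := by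
  unfold is_prime
  split_ifs with h1 h2 h3
  · constructor
    · intro h; simp at h
    · rintro ⟨ha, _⟩; omega
  · simp only [Bool.or_eq_true, beq_iff_eq] at h2
    constructor
    · intro _
      refine ⟨by omega, fun e he hsq hdvd => ?_⟩
      rcases h2 with rfl | rfl <;> nlinarith
    · intro _; rfl
  · simp only [Bool.or_eq_true, beq_iff_eq, PySem.Int.mod_eq_zero_iff_dvd] at h3
    simp only [Bool.or_eq_true, beq_iff_eq] at h2
    constructor
    · intro h; simp at h
    · rintro ⟨hn2, hnd⟩; exfalso
      rcases h3 with hdvd | hdvd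
      · have hn4 : 4 ≤ n := by omega
        exact hnd 2 (by omega) (by omega) hdvd
      · by_cases he : (2:Int) ∣ n
        · have hn4 : 4 ≤ n := by omega
          exact hnd 2 (by omega) (by omega) he
        · have hn9 : 9 ≤ n := by omega
          exact hnd 3 (by omega) (by omega) hdvd
  · simp only [Bool.or_eq_true, beq_iff_eq, PySem.Int.mod_eq_zero_iff_dvd, not_or] at h2 h3
    have hn5 : 5 ≤ n := by omega
    have hinv45 : ∀ d : Int, 2 ≤ d → d < 5 → ¬ d ∣ n := by
      intro d hd hlt hdvd
      have hcases : d = 2 ∨ d = 3 ∨ d = 4 := by omega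
      rcases hcases with rfl | rfl | rfl
      · exact h3.1 hdvd
      · exact h3.2 hdvd
      · exact h3.1 (dvd_trans (by norm_num : (2:Int) ∣ 4) hdvd)
    rw [isPrimeLoop_spec (n + 2).toNat n 5 (by omega) hn5 h3.1 h3.2 (by omega) (by omega) hinv45]
    exact ⟨fun r => ⟨by omega, r⟩, fun h => h.2⟩

theorem countExp_spec (fuel : Nat) (p m k : Int) (hf : m.toNat < fuel)
    (hp : 2 ≤ p) (hm : 1 ≤ m) :
    ∃ s : Int, ∃ j : Nat, countExp fuel p m k = (s, k + (j : Int)) ∧ m = s * p ^ j ∧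
      ¬ p ∣ s ∧ 1 ≤ s := by
  induction fuel generalizing m k with
  | zero => exact absurd hf (by omega)
  | succ fuel ih =>
    simp only [countExp]
    split_ifs with hc
    · have hdvd : p ∣ m := (PySem.Int.mod_eq_zero_iff_dvd m p).mp (by simpa using hc)
      rw [PySem.Int.floordiv_eq_ediv_of_pos (show (0:Int) < p by omega)]
      have hcancel : m / p * p = m := Int.ediv_mul_cancel hdvd
      have hm1 : 1 ≤ m / p := by nlinarith
      have hlt : m / p < m := by nlinarith
      obtain ⟨s, j, heq, hfact, hnd, hs⟩ := ih (m / p) (k + 1) (by omega) hm1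
      refine ⟨s, j + 1, ?_, ?_, hnd, hs⟩
      · rw [heq]; congr 1; push_cast; ring
      · calc m = m / p * p := hcancel.symm
          _ = s * p ^ j * p := by rw [hfact]
          _ = s * p ^ (j + 1) := by rw [pow_succ]; ring
    · have hnd : ¬ p ∣ m := fun hdvd =>
        hc (by simp [(PySem.Int.mod_eq_zero_iff_dvd m p).mpr hdvd])
      exact ⟨m, 0, by simp, by ring, hnd, hm⟩

theorem fcLoop_spec (fuel : Nat) (order limit p : Int) (h2 : 2 ≤ order)
    (hlim : limit = (Nat.sqrt order.toNat : Int))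
    (hf : (limit + 1 - p).toNat < fuel) (hp : 2 ≤ p)
    (hinv : ∀ e : Int, 2 ≤ e → e < p → ¬ e ∣ order) :
    (Cond order → fcLoop fuel order limit p = some (mF order)) ∧
    (¬ Cond order → fcLoop fuel order limit p = none) := by
  induction fuel generalizing p with
  | zero => exact absurd hf (by omega)
  | succ fuel ih =>
    obtain ⟨sv, j, heq, hfact, hnds, hs⟩ :=
      countExp_spec (order + 1).toNat p order 0 (by omega) hp (by omega)
    simp only [fcLoop, heq, zero_add, Int.toNat_natCast]
    split_ifs with hple hmodne hnp hpow hprime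
    · simp only [bne_iff_ne, ne_eq, PySem.Int.mod_eq_zero_iff_dvd] at hmodne
      refine ih (p + 1) (by omega) (by omega) ?_
      intro e he hlt hdvd
      by_cases hei : e < p
      · exact hinv e he hei hdvd
      · have : e = p := by omega
        exact hmodne (this ▸ hdvd)
    · exfalso
      simp only [bne_iff_ne, ne_eq, not_not, PySem.Int.mod_eq_zero_iff_dvd] at hmodne
      have hipr : IPr p := ⟨hp, fun e he hlt hdvde => hinv e he hlt (hdvde.trans hmodne)⟩
      have hip : is_prime p = true := by
        rw [is_prime_iff]
        exact ⟨hp, (no_small_div_iff hp).mpr hipr.2⟩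
      simp [hip] at hnp
    · -- p divides order, p prime, p ^ j = order: answer some p
      simp only [bne_iff_ne, ne_eq, not_not, PySem.Int.mod_eq_zero_iff_dvd] at hmodne
      simp only [beq_iff_eq] at hpow
      have hdvd : p ∣ order := hmodne
      have hipr : IPr p := ⟨hp, fun e he hlt hdvde => hinv e he hlt (hdvde.trans hdvd)⟩
      have hpmf : p = mF order := by
        have h1 := mF_min h2 hp hdvd
        have h4 := mF_iPr h2
        have h5 := mF_dvd h2
        by_contra hne
        exact hinv (mF order) h4.1 (by omega) h5
      refine ⟨fun _ => by rw [hpmf], fun hnc => absurd ?_ hnc⟩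
      intro q hq hqd
      rw [← hpow] at hqd
      have hqp : q ∣ p := (iPr_prime hq).dvd_of_dvd_pow hqd
      have hle : q ≤ p := Int.le_of_dvd (by omega) hqp
      have hnlt : ¬ q < p := fun hlt => hipr.2 q hq.1 hlt hqp
      have hqe : q = p := by omega
      rw [hqe, hpmf]
    · -- p divides order but p ^ j ≠ order: answer none
      simp only [bne_iff_ne, ne_eq, not_not, PySem.Int.mod_eq_zero_iff_dvd] at hmodne
      simp only [beq_iff_eq] at hpow
      have hdvd : p ∣ order := hmodne
      have hpmf : p = mF order := by
        have h1 := mF_min h2 hp hdvd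
        have h4 := mF_iPr h2
        have h5 := mF_dvd h2
        by_contra hne
        exact hinv (mF order) h4.1 (by omega) h5
      have hs1 : sv ≠ 1 := fun h => hpow (by rw [h, one_mul] at hfact; exact hfact.symm)
      have hs2 : 2 ≤ sv := by omega
      have hso : sv ∣ order := ⟨p ^ j, hfact⟩
      have htdvd : mF sv ∣ order := dvd_trans (mF_dvd hs2) hso
      have htne : mF sv ≠ p := fun h => hnds (h ▸ mF_dvd hs2)
      exact ⟨fun hc => absurd ((hc (mF sv) (mF_iPr hs2) htdvd).trans hpmf.symm) htne,
             fun _ => rfl⟩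
    · -- p > limit, order prime: answer some order
      have hns : ∀ e : Int, 2 ≤ e → e * e ≤ order → ¬ e ∣ order := by
        intro e he hsq
        apply hinv e he
        have he0 : (0:Int) ≤ e := by omega
        have h1 : e.toNat * e.toNat ≤ order.toNat := by
          have h2' : ((e.toNat * e.toNat : Nat) : Int) ≤ ((order.toNat : Nat) : Int) := by
            push_cast
            rw [Int.toNat_of_nonneg he0, Int.toNat_of_nonneg (by omega : (0:Int) ≤ order)]
            exact hsq
          exact_mod_cast h2'
        have h3 : e.toNat ≤ Nat.sqrt order.toNat := Nat.le_sqrt.mpr h1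
        have h4 : (e.toNat : Int) ≤ limit := by
          rw [hlim]
          exact_mod_cast h3
        rw [Int.toNat_of_nonneg he0] at h4
        omega
      have hall : ∀ q : Int, IPr q → q ∣ order → q = order := by
        intro q hq hqd
        have hle := Int.le_of_dvd (by omega) hqd
        by_contra hne
        exact (no_small_div_iff h2).mp hns q hq.1 (by omega) hqd
      have hmfo : mF order = order := hall (mF order) (mF_iPr h2) (mF_dvd h2)
      constructor
      · intro _
        rw [hmfo]
      · intro hnc
        exfalso
        apply hnc
        intro q hq hqd
        rw [hall q hq hqd, hmfo]
    · -- p > limit but is_prime order = false: impossible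
      exfalso
      apply hprime
      have hns : ∀ e : Int, 2 ≤ e → e * e ≤ order → ¬ e ∣ order := by
        intro e he hsq
        apply hinv e he
        have he0 : (0:Int) ≤ e := by omega
        have h1 : e.toNat * e.toNat ≤ order.toNat := by
          have h2' : ((e.toNat * e.toNat : Nat) : Int) ≤ ((order.toNat : Nat) : Int) := by
            push_cast
            rw [Int.toNat_of_nonneg he0, Int.toNat_of_nonneg (by omega : (0:Int) ≤ order)]
            exact hsq
          exact_mod_cast h2'
        have h3 : e.toNat ≤ Nat.sqrt order.toNat := Nat.le_sqrt.mpr h1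
        have h4 : (e.toNat : Int) ≤ limit := by
          rw [hlim]
          exact_mod_cast h3
        rw [Int.toNat_of_nonneg he0] at h4
        omega
      rw [is_prime_iff]
      exact ⟨h2, hns⟩

theorem stripAll_spec (fuel : Nat) (n d : Int) (hf : n.toNat ≤ fuel)
    (hd : 2 ≤ d) (hn : 1 ≤ n) :
    ∃ k : Nat, n = stripAll fuel n d * d ^ k ∧ ¬ d ∣ stripAll fuel n d ∧
      1 ≤ stripAll fuel n d := by
  induction fuel generalizing n with
  | zero => exact absurd hf (by omega)
  | succ fuel ih =>
    simp only [stripAll]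
    split_ifs with hc
    · have hdvd : d ∣ n := (PySem.Int.mod_eq_zero_iff_dvd n d).mp (by simpa using hc)
      rw [PySem.Int.floordiv_eq_ediv_of_pos (show (0:Int) < d by omega)]
      have hcancel : n / d * d = n := Int.ediv_mul_cancel hdvd
      have hm1 : 1 ≤ n / d := by nlinarith
      have hlt : n / d < n := by nlinarith
      obtain ⟨k, hfact, hnd, hs⟩ := ih (n / d) (by omega) hm1
      refine ⟨k + 1, ?_, hnd, hs⟩
      calc n = n / d * d := hcancel.symm
        _ = stripAll fuel (n / d) d * d ^ k * d := by rw [← hfact]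
        _ = stripAll fuel (n / d) d * d ^ (k + 1) := by rw [pow_succ]; ring
    · have hnd : ¬ d ∣ n := fun hdvd =>
        hc (by simp [(PySem.Int.mod_eq_zero_iff_dvd n d).mpr hdvd])
      exact ⟨0, by simp, hnd, hn⟩

theorem fcAltLoop_spec (fuel : Nat) (d n : Int) (acc : PySem.Set Int)
    (hf : (n + 2 - d).toNat < fuel)
    (hd : 2 ≤ d) (hn : 1 ≤ n)
    (hinv : ∀ e : Int, 2 ≤ e → e < d → ¬ e ∣ n)
    (hacc : ∀ x ∈ acc, x < d) :
    ∃ m : Int, ∃ L : List Int,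
      fcAltLoop fuel d n acc = (m, acc ++ L) ∧ 1 ≤ m ∧ m ∣ n ∧
      (∀ e : Int, 2 ≤ e → e * e ≤ m → ¬ e ∣ m) ∧
      (∀ p ∈ L, d ≤ p ∧ p ∣ n ∧ IPr p) ∧
      (∀ q : Int, IPr q → q ∣ n → (q ∣ m ∨ q ∈ L)) ∧
      L.Pairwise (· < ·) := by
  induction fuel generalizing d n acc with
  | zero => exact absurd hf (by omega)
  | succ fuel ih =>
    simp only [fcAltLoop]
    split_ifs with hguard hmod
    · -- d divides n: strip it out and recurse
      have hdd : d ≤ d * d := by nlinarith [mul_self_nonneg d, mul_self_nonneg (d - 1)]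
      have hdvd : d ∣ n := (PySem.Int.mod_eq_zero_iff_dvd n d).mp (by simpa using hmod)
      obtain ⟨k, hfact, hndstrip, hstrip1⟩ := stripAll_spec n.toNat n d (le_refl _) hd hn
      have hsdvd : stripAll n.toNat n d ∣ n := ⟨d ^ k, hfact⟩
      have hstrip_le : stripAll n.toNat n d ≤ n := by
        have hdk : (0:Int) < d ^ k := pow_pos (by omega) k
        nlinarith
      have hinv' : ∀ e : Int, 2 ≤ e → e < d + 1 → ¬ e ∣ stripAll n.toNat n d := by
        intro e he hlt hedvd
        by_cases hei : e < d
        · exact hinv e he hei (hedvd.trans hsdvd)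
        · have : e = d := by omega
          exact hndstrip (this ▸ hedvd)
      have hacc' : ∀ x ∈ PySem.Set.add acc d, x < d + 1 := by
        intro x hx
        rw [PySem.Set.mem_add] at hx
        rcases hx with hx | rfl
        · have := hacc x hx; omega
        · omega
      obtain ⟨m, L', heq, hm1, hmdvd, hsmall, hL, hcover, hpw⟩ :=
        ih (d + 1) (stripAll n.toNat n d) (PySem.Set.add acc d) (by omega) (by omega)
          hstrip1 hinv' hacc'
      have haddeq : PySem.Set.add acc d = acc ++ [d] :=
        PySem.Set.add_of_not_mem (fun hmem => by have := hacc d hmem; omega)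
      refine ⟨m, d :: L', ?_, hm1, hmdvd.trans hsdvd, hsmall, ?_, ?_, ?_⟩
      · rw [heq, haddeq]
        simp
      · intro q hq
        rcases List.mem_cons.mp hq with rfl | hq'
        · exact ⟨le_refl q, hdvd, ⟨hd, fun e he hlt hedvd => hinv e he hlt (hedvd.trans hdvd)⟩⟩
        · obtain ⟨hdp, hpdvd, hipr⟩ := hL q hq'
          exact ⟨by omega, hpdvd.trans hsdvd, hipr⟩
      · intro q hq hqdvd
        have hq2 : 2 ≤ q := hq.1
        have hqged : d ≤ q := by
          by_contra hqlt
          exact hinv q hq2 (by omega) hqdvd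
        by_cases hqd : q = d
        · right
          rw [hqd]
          exact List.mem_cons_self
        · have hnqd : ¬ q ∣ d := fun hdd2 => by
            have := Int.le_of_dvd (by omega) hdd2
            omega
          have hq_s : q ∣ stripAll n.toNat n d := by
            have hprime := iPr_prime hq
            rw [hfact] at hqdvd
            rcases hprime.dvd_mul.mp hqdvd with hcase | hcase
            · exact hcase
            · exact absurd (hprime.dvd_of_dvd_pow hcase) hnqd
          rcases hcover q hq hq_s with hcase | hcase
          · exact Or.inl hcase
          · exact Or.inr (List.mem_cons_of_mem _ hcase)
      · rw [List.pairwise_cons]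
        exact ⟨fun x hx => by have := (hL x hx).1; omega, hpw⟩
    · -- d does not divide n: move on
      have hdd : d ≤ d * d := by nlinarith [mul_self_nonneg d, mul_self_nonneg (d - 1)]
      have hnd : ¬ d ∣ n := fun hdd2 =>
        hmod (by simp [(PySem.Int.mod_eq_zero_iff_dvd n d).mpr hdd2])
      have hinv' : ∀ e : Int, 2 ≤ e → e < d + 1 → ¬ e ∣ n := by
        intro e he hlt hedvd
        by_cases hei : e < d
        · exact hinv e he hei hedvd
        · have : e = d := by omega
          exact hnd (this ▸ hedvd)
      obtain ⟨m, L, heq, hm1, hmdvd, hsmall, hL, hcover, hpw⟩ :=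
        ih (d + 1) n acc (by omega) (by omega) hn hinv'
          (fun x hx => by have := hacc x hx; omega)
      refine ⟨m, L, heq, hm1, hmdvd, hsmall, ?_, hcover, hpw⟩
      intro q hq
      obtain ⟨hdp, hpdvd, hipr⟩ := hL q hq
      exact ⟨by omega, hpdvd, hipr⟩
    · -- loop exit: no divisor of n is ≤ its square root, so n = 1 or n is prime
      refine ⟨n, [], by simp, by omega, dvd_refl n, ?_, by simp,
        fun q _ hqd => Or.inl hqd, List.Pairwise.nil⟩
      intro e he hsq hedvd
      have helt : e < d := by
        by_contra hge
        have hle : d ≤ e := by omega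
        have : d * d ≤ e * e := mul_le_mul hle hle (by omega) (by omega)
        omega
      exact hinv e he helt hedvd

theorem two_le_length {l : List Int} {a b : Int} (ha : a ∈ l) (hb : b ∈ l)
    (hne : a ≠ b) : 2 ≤ l.length := by
  rcases l with _ | ⟨x, _ | ⟨y, t⟩⟩
  · simp at ha
  · simp at ha hb; omega
  · simp

theorem A_char (order : Int) (h : 2 ≤ order) :
    (Cond order → field_characteristic order = some (mF order)) ∧
    (¬ Cond order → field_characteristic order = none) := by
  unfold field_characteristic
  rw [if_neg (by omega : ¬ order < 2)]
  have hsq : 1 ≤ Nat.sqrt order.toNat := Nat.le_sqrt.mpr (by omega)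
  exact fcLoop_spec ((Nat.sqrt order.toNat : Int) + 1).toNat order _ 2 h rfl (by omega)
    (by omega) (fun e he hlt => by omega)

theorem B_char (order : Int) (h : 2 ≤ order) :
    (Cond order → field_characteristic_alt order = some (mF order)) ∧
    (¬ Cond order → field_characteristic_alt order = none) := by
  obtain ⟨m, L, heq, hm1, hmdvd, hsmall, hL, hcover, hpw⟩ :=
    fcAltLoop_spec (order + 1).toNat 2 order PySem.Set.empty (by omega) (by omega) (by omega)
      (fun e he hlt => by omega) (fun x hx => by simp [PySem.Set.empty] at hx)
  have hr : fcAltLoop (order + 1).toNat 2 order PySem.Set.empty = (m, L) := by simpa using heq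
  have hgoal : field_characteristic_alt order =
      (if PySem.Set.len (if m > 1 then PySem.Set.add L m else L) == 1
       then (if m > 1 then PySem.Set.add L m else L).head? else none) := by
    unfold field_characteristic_alt
    rw [if_neg (by omega : ¬ order < 2), hr]
  rw [hgoal]
  constructor
  · intro hc
    have hpI := mF_iPr h
    have hpd := mF_dvd h
    have hallL : ∀ x ∈ L, x = mF order := fun x hx => hc x (hL x hx).2.2 (hL x hx).2.1
    have hL01 : L = [] ∨ L = [mF order] := by
      rcases L with _ | ⟨x, _ | ⟨y, t⟩⟩
      · exact Or.inl rfl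
      · exact Or.inr (by rw [hallL x List.mem_cons_self])
      · exfalso
        have hx := hallL x List.mem_cons_self
        have hy := hallL y (by simp)
        rw [List.pairwise_cons] at hpw
        have := hpw.1 y (by simp)
        omega
    by_cases hm2 : 1 < m
    · have hmI : IPr m := ⟨by omega, (no_small_div_iff (by omega)).mp hsmall⟩
      have hmp : m = mF order := hc m hmI hmdvd
      rw [if_pos hm2]
      have hadd : PySem.Set.add L m = [mF order] := by
        rcases hL01 with hLe | hLe
        · rw [hLe, hmp]
          exact PySem.Set.add_of_not_mem (by simp)
        · rw [hLe, hmp]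
          exact PySem.Set.add_of_mem (by simp)
      rw [hadd]
      simp [PySem.Set.len]
    · have hmeq : m = 1 := by omega
      have hpm : ¬ mF order ∣ m := by
        rw [hmeq]
        intro hdd
        have := Int.le_of_dvd one_pos hdd
        have := hpI.1
        omega
      have hpL : mF order ∈ L := (hcover (mF order) hpI hpd).resolve_left hpm
      have hLe : L = [mF order] := by
        rcases hL01 with hLe | hLe
        · rw [hLe] at hpL; simp at hpL
        · exact hLe
      rw [if_neg hm2, hLe]
      simp [PySem.Set.len]
  · intro hnc
    unfold Cond at hnc
    push Not at hnc
    obtain ⟨q, hqI, hqd, hqne⟩ := hnc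
    have hpI := mF_iPr h
    have hpd := mF_dvd h
    have key : ∀ x : Int, IPr x → x ∣ order → (x ∈ L ∨ (1 < m ∧ x = m)) := by
      intro x hx hxd
      rcases hcover x hx hxd with hxm | hxL
      · right
        have hx2 := hx.1
        have hxle : x ≤ m := Int.le_of_dvd (by omega) hxm
        have hm2 : 2 ≤ m := by omega
        have hmI2 : IPr m := ⟨hm2, (no_small_div_iff hm2).mp hsmall⟩
        have : ¬ x < m := fun hlt => hmI2.2 x hx2 hlt hxm
        exact ⟨by omega, by omega⟩
      · exact Or.inl hxL
    by_cases hm2 : 1 < m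
    · rw [if_pos hm2]
      have hmemP : ∀ x : Int, IPr x → x ∣ order → x ∈ PySem.Set.add L m := by
        intro x hx hxd
        rw [PySem.Set.mem_add]
        rcases key x hx hxd with hcase | hcase
        · exact Or.inl hcase
        · exact Or.inr hcase.2
      have hlen := two_le_length (hmemP (mF order) hpI hpd) (hmemP q hqI hqd) (fun hcontra => hqne hcontra.symm)
      rw [if_neg]
      intro habs
      simp only [PySem.Set.len, beq_iff_eq] at habs
      omega
    · rw [if_neg hm2]
      have hmemP : ∀ x : Int, IPr x → x ∣ order → x ∈ L := by
        intro x hx hxd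
        rcases key x hx hxd with hcase | hcase
        · exact hcase
        · omega
      have hlen := two_le_length (hmemP (mF order) hpI hpd) (hmemP q hqI hqd) (fun hcontra => hqne hcontra.symm)
      rw [if_neg]
      intro habs
      simp only [PySem.Set.len, beq_iff_eq] at habs
      omega


-- ===== VERDICT (by name: the statement is the Claim_ definition above) =====
theorem field_characteristic_spec : Claim_equal_field_characteristic := by
  intro order _
  unfold Spec_field_characteristic
  by_cases hlt : order < 2
  · simp [field_characteristic, field_characteristic_alt, hlt]
  · have h2 : 2 ≤ order := by omega
    by_cases hc : Cond order
    · rw [(A_char order h2).1 hc, (B_char order h2).1 hc]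
    · rw [(A_char order h2).2 hc, (B_char order h2).2 hc]
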